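-- pv_equiv track=rewrite | github.com/Dadudekc/AutoDream.Os | tools/team_collaboration_tool.py | create_tool_roadmap
-- ===== SOURCE A (Python) =====
-- from typing import Dict, List, Any
--
-- def create_tool_roadmap(priorities: Dict[str, List[str]]):
--     """Create a tool development roadmap based on team priorities"""
--     roadmap = {
--         "Phase 1 - Quick Wins": [],
--         "Phase 2 - High Impact": [],
--         "Phase 3 - Advanced Features": []
--     }
--
--     # Categorize tools by complexity and impact
--     for agent, tools in priorities.items():
--         for i, tool in enumerate(tools):
--             if i < 2:  # First 2 tools are quick wins
--                 roadmap["Phase 1 - Quick Wins"].append(f"{agent}: {tool}")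
--             elif i < 3:  # 3rd tool is high impact
--                 roadmap["Phase 2 - High Impact"].append(f"{agent}: {tool}")
--             else:  # 4th tool is advanced
--                 roadmap["Phase 3 - Advanced Features"].append(f"{agent}: {tool}")
--
--     return roadmap
-- ===== SOURCE B (Python) =====
-- def create_tool_roadmap(priorities):
--     """Create a tool development roadmap based on team priorities"""
--     PHASES = ["Phase 1 - Quick Wins", "Phase 2 - High Impact", "Phase 3 - Advanced Features"]
--     TABLE = [0, 0, 1, 2]  # phase of a tool at position i is TABLE[min(i, 3)]
--     tagged = [(TABLE[min(i, 3)], f"{agent}: {tool}")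
--               for agent, tools in priorities.items()
--               for i, tool in enumerate(tools)]
--     return {name: [lbl for p, lbl in tagged if p == k]
--             for k, name in enumerate(PHASES)}
-- ===== Notes on version B (the rewrite author's own statement) =====
-- stated objective: alternative
-- what changed: Replaces A's single-pass partition into three accumulator lists (per-element if/elif dispatch) with staged passes: first flatten all tools into one flat list tagged with a phase number from a lookup table TABLE[min(i,3)], then build each phase by filtering that flat list.
import Mathlib
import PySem

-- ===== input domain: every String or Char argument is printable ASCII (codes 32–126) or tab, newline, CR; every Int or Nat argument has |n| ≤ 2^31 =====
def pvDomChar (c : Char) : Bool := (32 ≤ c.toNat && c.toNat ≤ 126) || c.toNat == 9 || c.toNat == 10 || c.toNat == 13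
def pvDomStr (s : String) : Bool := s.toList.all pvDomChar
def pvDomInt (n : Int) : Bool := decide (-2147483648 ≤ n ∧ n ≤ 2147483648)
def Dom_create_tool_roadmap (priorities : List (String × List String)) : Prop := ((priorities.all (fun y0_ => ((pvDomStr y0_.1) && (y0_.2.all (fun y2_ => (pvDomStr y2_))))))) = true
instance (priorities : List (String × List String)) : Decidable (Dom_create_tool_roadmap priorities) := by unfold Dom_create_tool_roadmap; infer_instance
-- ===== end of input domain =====

-- B replaces A's single-pass three-accumulator partition with staged passes: a flat
-- phase-tagged list (tag from a lookup table TABLE[min(i,3)]) is built first, then each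
-- phase list is obtained by filtering it (objective: alternative decomposition).

-- ===== PORT A =====
-- A's dict 'roadmap' with its three fixed keys is kept as a triple of lists
-- (Phase 1, Phase 2, Phase 3), assembled into the association list at the end.
def create_tool_roadmap (priorities : List (String × List String)) : List (String × List String) :=
  let r := priorities.foldl (fun st p =>
    (PySem.List.enumerate p.2 0).foldl (fun st it =>
      if it.1 < 2 then (st.1 ++ [p.1 ++ ": " ++ it.2], st.2.1, st.2.2)
      else if it.1 < 3 then (st.1, st.2.1 ++ [p.1 ++ ": " ++ it.2], st.2.2)
      else (st.1, st.2.1, st.2.2 ++ [p.1 ++ ": " ++ it.2])) st) (([], [], []) : List String × List String × List String)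
  [("Phase 1 - Quick Wins", r.1), ("Phase 2 - High Impact", r.2.1), ("Phase 3 - Advanced Features", r.2.2)]

-- ===== PORT B =====
-- TABLE[min(i, 3)] is always in range in B (the index is in 0..3); `.getD 0` only
-- discharges the Option returned by the exact indexing primitive.
def create_tool_roadmap_alt (priorities : List (String × List String)) : List (String × List String) :=
  let phases : List String := ["Phase 1 - Quick Wins", "Phase 2 - High Impact", "Phase 3 - Advanced Features"]
  let table : List Int := [0, 0, 1, 2]
  let tagged : List (Int × String) := priorities.flatMap (fun p =>
    (PySem.List.enumerate p.2 0).map (fun it =>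
      ((PySem.List.pyGet? table (min it.1 3)).getD 0, p.1 ++ ": " ++ it.2)))
  (PySem.List.enumerate phases 0).map (fun kn =>
    (kn.2, (tagged.filter (fun x => x.1 == kn.1)).map (fun x => x.2)))

-- ===== PRECONDITION & SPEC =====
def Spec_create_tool_roadmap (priorities : List (String × List String)) (out : List (String × List String)) : Prop := out = create_tool_roadmap_alt priorities
instance (priorities : List (String × List String)) (out : List (String × List String)) : Decidable (Spec_create_tool_roadmap priorities out) := by unfold Spec_create_tool_roadmap; infer_instance

-- ===== CLAIM (what is proved, stated in full; the proofs are below) =====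
def Claim_equal_create_tool_roadmap : Prop := ∀ (priorities : List (String × List String)), Dom_create_tool_roadmap priorities → Spec_create_tool_roadmap priorities (create_tool_roadmap priorities)

-- ===== LEMMAS AND PROOFS =====

-- B's tag of a position i (what TABLE[min(i,3)] computes)
def pvTag (i : Int) : Int := (PySem.List.pyGet? [0, 0, 1, 2] (min i 3)).getD 0

-- B's tagged flat segment contributed by one agent
def pvTagged (agent : String) (tools : List String) (s : Int) : List (Int × String) :=
  (PySem.List.enumerate tools s).map (fun it => (pvTag it.1, agent ++ ": " ++ it.2))

def pvFilt (k : Int) (xs : List (Int × String)) : List String :=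
  (xs.filter (fun x => x.1 == k)).map (fun x => x.2)

theorem pvFilt_append (k : Int) (xs ys : List (Int × String)) :
    pvFilt k (xs ++ ys) = pvFilt k xs ++ pvFilt k ys := by
  simp [pvFilt]

-- values of the tag function
theorem pvTag_lt2 (i : Int) (h0 : 0 ≤ i) (h : i < 2) : pvTag i = 0 := by
  have h01 : i = 0 ∨ i = 1 := by omega
  rcases h01 with h' | h' <;> rw [h'] <;> decide

theorem pvTag_eq2 : pvTag 2 = 1 := by decide

theorem pvTag_ge3 (i : Int) (h : 3 ≤ i) : pvTag i = 2 := by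
  have h3 : min i 3 = 3 := min_eq_right h
  unfold pvTag
  rw [h3]
  decide

-- A's inner enumerate-loop, started at any index s ≥ 0, ends with each phase list
-- extended by the matching filter of B's tagged segment for that agent.
theorem innerA (agent : String) (tools : List String) :
    ∀ (s : Int) (a b c : List String), 0 ≤ s →
    (PySem.List.enumerate tools s).foldl (fun st it =>
      if it.1 < 2 then (st.1 ++ [agent ++ ": " ++ it.2], st.2.1, st.2.2)
      else if it.1 < 3 then (st.1, st.2.1 ++ [agent ++ ": " ++ it.2], st.2.2)
      else (st.1, st.2.1, st.2.2 ++ [agent ++ ": " ++ it.2])) (a, b, c)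
      = (a ++ pvFilt 0 (pvTagged agent tools s),
         b ++ pvFilt 1 (pvTagged agent tools s),
         c ++ pvFilt 2 (pvTagged agent tools s)) := by
  induction tools with
  | nil => intro s a b c _; simp [PySem.List.enumerate_nil, pvTagged, pvFilt]
  | cons t ts ih =>
    intro s a b c hs
    rw [PySem.List.enumerate_cons]
    simp only [List.foldl_cons]
    have step : pvTagged agent (t :: ts) s
        = (pvTag s, agent ++ ": " ++ t) :: pvTagged agent ts (s + 1) := by
      simp [pvTagged, PySem.List.enumerate_cons]
    by_cases h2 : s < 2
    · rw [if_pos h2, ih (s + 1) _ _ _ (by omega), step]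
      simp [pvFilt, pvTag_lt2 s hs h2]
    · rw [if_neg h2]
      by_cases h3 : s < 3
      · have hs2 : s = 2 := by omega
        rw [if_pos h3, ih (s + 1) _ _ _ (by omega), step, hs2]
        simp [pvFilt, pvTag_eq2]
      · rw [if_neg h3, ih (s + 1) _ _ _ (by omega), step]
        simp [pvFilt, pvTag_ge3 s (by omega)]

-- A's outer fold: each accumulator extended by the filter of the whole tagged list
theorem outerA (priorities : List (String × List String)) :
    ∀ (a b c : List String),
    priorities.foldl (fun st p =>
      (PySem.List.enumerate p.2 0).foldl (fun st it =>
        if it.1 < 2 then (st.1 ++ [p.1 ++ ": " ++ it.2], st.2.1, st.2.2)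
        else if it.1 < 3 then (st.1, st.2.1 ++ [p.1 ++ ": " ++ it.2], st.2.2)
        else (st.1, st.2.1, st.2.2 ++ [p.1 ++ ": " ++ it.2])) st) (a, b, c)
      = (a ++ pvFilt 0 (priorities.flatMap (fun p => pvTagged p.1 p.2 0)),
         b ++ pvFilt 1 (priorities.flatMap (fun p => pvTagged p.1 p.2 0)),
         c ++ pvFilt 2 (priorities.flatMap (fun p => pvTagged p.1 p.2 0))) := by
  induction priorities with
  | nil => intro a b c; simp [pvFilt]
  | cons p ps ih =>
    intro a b c
    simp only [List.foldl_cons]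
    rw [innerA p.1 p.2 0 a b c le_rfl, ih]
    simp [pvFilt_append, List.append_assoc]

-- ===== VERDICT (by name: the statement is the Claim_ definition above) =====
theorem create_tool_roadmap_spec : Claim_equal_create_tool_roadmap := by
  intro priorities _
  unfold Spec_create_tool_roadmap create_tool_roadmap create_tool_roadmap_alt
  simp only []
  rw [outerA priorities [] [] []]
  simp [PySem.List.enumerate_cons, PySem.List.enumerate_nil, pvTagged, pvTag, pvFilt]
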